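-- pv_equiv track=rewrite | github.com/cda2/BJ | python/src/bj13022.py | solution
-- ===== SOURCE A (Python) =====
-- def solution(string):
--     frequency = [0 for i in range(4)]
--     for i in string:
--         if i == "w":
--             frequency[0] += 1
--         elif i == "o":
--             frequency[1] += 1
--         elif i == "l":
--             frequency[2] += 1
--         elif i == "f":
--             frequency[3] += 1
--     if frequency[0] != frequency[1] != frequency[2] != frequency[3]:
--         return 0
--     i = 0
--     while i <= len(string) - 4:
--         if string[i] == "w":
--             count, tmp = 1, i
--             while tmp <= len(string) - 2 and string[tmp + 1] == "w":
--                 count, tmp = count + 1, tmp + 1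
--             if (
--                 string[i: i + count * 4]
--                 == "w" * count + "o" * count + "l" * count + "f" * count
--             ):
--                 i += count * 4
--             else:
--                 return 0
--         else:
--             return 0
--     if i == len(string):
--         return 1
--     else:
--         return 0
-- ===== SOURCE B (Python) =====
-- def solution(string):
--     # Run-length encode the string, then validate blocks of four runs.
--     runs = []
--     for c in string:
--         if runs and runs[-1][0] == c:
--             runs[-1][1] += 1
--         else:
--             runs.append([c, 1])
--     if len(runs) % 4 != 0:
--         return 0
--     for j in range(0, len(runs), 4):
--         (c0, n0), (c1, n1), (c2, n2), (c3, n3) = runs[j:j + 4]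
--         if (c0, c1, c2, c3) != ("w", "o", "l", "f") or not (n0 == n1 == n2 == n3):
--             return 0
--     return 1
-- ===== Notes on version B (the rewrite author's own statement) =====
-- stated objective: idiomatic
-- what changed: B replaces A's count-leading-w's-then-slice-compare index scan (plus a redundant frequency pre-check, which is dropped) with a single run-length encoding pass followed by validating each group of four runs as chars w,o,l,f with equal lengths.
import Mathlib
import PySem

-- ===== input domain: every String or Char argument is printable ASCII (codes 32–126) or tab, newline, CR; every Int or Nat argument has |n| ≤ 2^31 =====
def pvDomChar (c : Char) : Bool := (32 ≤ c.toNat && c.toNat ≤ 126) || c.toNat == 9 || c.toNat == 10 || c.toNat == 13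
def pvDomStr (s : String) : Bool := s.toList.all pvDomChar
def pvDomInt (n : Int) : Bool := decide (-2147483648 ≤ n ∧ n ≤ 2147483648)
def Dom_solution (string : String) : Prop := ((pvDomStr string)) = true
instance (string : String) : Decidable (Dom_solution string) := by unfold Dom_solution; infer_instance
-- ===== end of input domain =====

-- B validates "wolf-block" strings by a single run-length-encoding pass instead of
-- A's count-leading-w's-then-slice-compare scan (A's redundant frequency pre-check is dropped);
-- objective: more idiomatic, same O(n) cost.

-- ===== PORT A =====

-- inner while: count, tmp = count+1, tmp+1 while tmp <= len-2 and string[tmp+1] == 'w'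
-- (fuel-bounded structural recursion; fuel = s.length always suffices, the scan index is strictly increasing)
def wolfRun (s : List Char) : Nat → Nat → Nat → Nat × Nat
  | 0, tmp, count => (count, tmp)
  | fuel + 1, tmp, count =>
    if tmp + 2 ≤ s.length ∧ s[tmp + 1]? = some 'w' then
      wolfRun s fuel (tmp + 1) (count + 1)
    else (count, tmp)

-- outer while over index i (fuel = s.length + 1 suffices, i advances by ≥ 4 each iteration)
def loopA (s : List Char) : Nat → Nat → Int
  | 0, _ => 0
  | fuel + 1, i =>
    if i + 4 ≤ s.length then
      if s[i]? = some 'w' then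
        let count := (wolfRun s s.length i 1).1
        if (s.drop i).take (count * 4) =
            List.replicate count 'w' ++ List.replicate count 'o' ++
            List.replicate count 'l' ++ List.replicate count 'f' then
          loopA s fuel (i + count * 4)
        else 0
      else 0
    else if i = s.length then 1 else 0

def freqStep (f : Nat × Nat × Nat × Nat) (c : Char) : Nat × Nat × Nat × Nat :=
  if c = 'w' then (f.1 + 1, f.2.1, f.2.2.1, f.2.2.2)
  else if c = 'o' then (f.1, f.2.1 + 1, f.2.2.1, f.2.2.2)
  else if c = 'l' then (f.1, f.2.1, f.2.2.1 + 1, f.2.2.2)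
  else if c = 'f' then (f.1, f.2.1, f.2.2.1, f.2.2.2 + 1)
  else f

def solution (string : String) : Int :=
  let s := string.toList
  let freq := s.foldl freqStep (0, 0, 0, 0)
  if freq.1 ≠ freq.2.1 ∧ freq.2.1 ≠ freq.2.2.1 ∧ freq.2.2.1 ≠ freq.2.2.2 then 0
  else loopA s (s.length + 1) 0

-- ===== PORT B =====

-- one step of the runs-building loop (append a new run or bump the last one)
def rleStep (runs : List (Char × Int)) (c : Char) : List (Char × Int) :=
  match runs.getLast? with
  | some (c', n) => if c' = c then runs.dropLast ++ [(c', n + 1)] else runs ++ [(c, 1)]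
  | none => [(c, 1)]

-- the for-j loop: consume four runs per block
def checkBlocks : List (Char × Int) → Int
  | [] => 1
  | (c0, n0) :: (c1, n1) :: (c2, n2) :: (c3, n3) :: rest =>
      if (c0 = 'w' ∧ c1 = 'o' ∧ c2 = 'l' ∧ c3 = 'f') ∧ (n0 = n1 ∧ n1 = n2 ∧ n2 = n3) then
        checkBlocks rest
      else 0
  | _ :: _ => 0  -- fewer than four runs left (unreachable after the % 4 check)

def solution_alt (string : String) : Int :=
  let runs := string.toList.foldl rleStep []
  if runs.length % 4 ≠ 0 then 0 else checkBlocks runs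

-- ===== PRECONDITION & SPEC =====
def Spec_solution (string : String) (out : Int) : Prop := out = solution_alt string
instance (string : String) (out : Int) : Decidable (Spec_solution string out) := by unfold Spec_solution; infer_instance

-- ===== CLAIM (what is proved, stated in full; the proofs are below) =====
def Claim_equal_solution : Prop := ∀ (string : String), Dom_solution string → Spec_solution string (solution string)

-- ===== LEMMAS AND PROOFS =====

-- number of leading 'w' characters
def leadW : List Char → Nat
  | [] => 0
  | c :: t => if c = 'w' then leadW t + 1 else 0

theorem leadW_pos {t : List Char} (h : t.head? = some 'w') : 1 ≤ leadW t := by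
  cases t with
  | nil => simp at h
  | cons a t => simp at h; simp [leadW, h]

def blockL (c : Nat) : List Char :=
  List.replicate c 'w' ++ List.replicate c 'o' ++ List.replicate c 'l' ++ List.replicate c 'f'

theorem blockL_length (c : Nat) : (blockL c).length = c * 4 := by
  simp [blockL]; omega

-- suffix view of A's outer loop
def loopT (t : List Char) : Int :=
  if 4 ≤ t.length then
    if h : t.head? = some 'w' then
      if t.take (leadW t * 4) = blockL (leadW t) then loopT (t.drop (leadW t * 4)) else 0
    else 0
  else if t = [] then 1 else 0
termination_by t.length
decreasing_by
  have := leadW_pos h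
  simp; omega

-- valid "wolf" strings
inductive W : List Char → Prop
  | nil : W []
  | block (c : Nat) (t : List Char) : 1 ≤ c → W t → W (blockL c ++ t)

-- front run-length encoding, structurally
def rleRcons (a : Char) : List (Char × Int) → List (Char × Int)
  | [] => [(a, 1)]
  | (d, m) :: rest => if a = d then (d, m + 1) :: rest else (a, 1) :: (d, m) :: rest

def rleR : List Char → List (Char × Int)
  | [] => []
  | a :: t => rleRcons a (rleR t)

def expand (rs : List (Char × Int)) : List Char :=
  rs.flatMap (fun p => List.replicate p.2.toNat p.1)

-- merge of an accumulator with a front RLE (boundary may coalesce)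
def rleMerge (acc rs : List (Char × Int)) : List (Char × Int) :=
  match acc.getLast?, rs with
  | some (c, n), (c', m) :: rest => if c = c' then acc.dropLast ++ (c, n + m) :: rest else acc ++ rs
  | _, _ => acc ++ rs


theorem rleR_head (b : Char) (r : List Char) :
    ∃ n rest, rleR (b :: r) = (b, n) :: rest := by
  rw [rleR]
  rcases hr : rleR r with _ | ⟨⟨d, m⟩, rest⟩
  · exact ⟨1, [], rfl⟩
  · by_cases hbd : b = d
    · subst hbd; exact ⟨m + 1, rest, by rw [rleRcons, if_pos rfl]⟩
    · exact ⟨1, (d, m) :: rest, by rw [rleRcons, if_neg hbd]⟩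

theorem rleMerge_nil (acc : List (Char × Int)) : rleMerge acc [] = acc := by
  rcases h : acc.getLast? with _ | ⟨c, n⟩ <;> simp [rleMerge, h]

theorem rleMerge_step (acc : List (Char × Int)) (a : Char) (l : List Char) :
    rleMerge acc (rleR (a :: l)) = rleMerge (rleStep acc a) (rleR l) := by
  rw [rleR]
  rcases hl : rleR l with _ | ⟨⟨d, m⟩, rest⟩
  · rw [rleMerge_nil]
    rcases hacc : acc.getLast? with _ | ⟨c, n⟩
    · have : acc = [] := by simpa using hacc
      subst this
      simp [rleMerge, rleStep, rleRcons]
    · by_cases hca : c = a <;> simp [rleMerge, rleStep, rleRcons, hacc, hca]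
  · rw [rleRcons]
    rcases hacc : acc.getLast? with _ | ⟨c, n⟩
    · have : acc = [] := by simpa using hacc
      subst this
      by_cases had : a = d
      · subst had
        simp [rleMerge, rleStep]
        omega
      · simp [rleMerge, rleStep, had]
    · by_cases had : a = d <;> by_cases hca : c = a
      · subst had; subst hca
        simp [rleMerge, rleStep, hacc]
        omega
      · subst had
        simp [rleMerge, rleStep, hacc, hca]
        omega
      · subst hca
        have hcd : ¬ c = d := had
        simp [rleMerge, rleStep, hacc, hcd]
      · simp [rleMerge, rleStep, hacc, hca, had]

theorem foldl_rleStep (l : List Char) (acc : List (Char × Int)) :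
    List.foldl rleStep acc l = rleMerge acc (rleR l) := by
  induction l generalizing acc with
  | nil => simp [rleR, rleMerge_nil]
  | cons a l ih => rw [List.foldl_cons, ih, rleMerge_step]

theorem rleR_eq_foldl (l : List Char) : List.foldl rleStep [] l = rleR l := by
  rw [foldl_rleStep]
  rcases h : rleR l with _ | ⟨⟨d, m⟩, rest⟩ <;> simp [rleMerge]

theorem wolfRun_count_ge (s : List Char) (fuel tmp count : Nat) :
    count ≤ (wolfRun s fuel tmp count).1 := by
  induction fuel generalizing tmp count with
  | zero => simp [wolfRun]
  | succ fuel ih =>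
    rw [wolfRun]
    split_ifs with h
    · exact le_trans (by omega) (ih (tmp + 1) (count + 1))
    · simp

theorem wolfRun_spec (s : List Char) (fuel tmp count : Nat)
    (hf : s.length - (tmp + 1) ≤ fuel) :
    (wolfRun s fuel tmp count).1 = count + leadW (s.drop (tmp + 1)) := by
  induction fuel generalizing tmp count with
  | zero =>
    have hnil : s.drop (tmp + 1) = [] := by
      rw [List.drop_eq_nil_iff]; omega
    rw [wolfRun, hnil]
    simp [leadW]
  | succ fuel ih =>
    rw [wolfRun]
    split_ifs with h
    · have hlt : tmp + 1 < s.length := by omega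
      have hget : s[tmp + 1] = 'w' := by
        have := h.2
        rw [List.getElem?_eq_getElem hlt] at this
        simpa using this
      have hd : s.drop (tmp + 1) = s[tmp + 1] :: s.drop (tmp + 2) :=
        List.drop_eq_getElem_cons hlt
      rw [ih (tmp + 1) (count + 1) (by omega), hd, hget, leadW,
        show tmp + 1 + 1 = tmp + 2 from rfl]
      simp
      omega
    · by_cases hlt : tmp + 1 < s.length
      · have h2 : ¬ s[tmp + 1]? = some 'w' := by
          intro hc; exact h ⟨by omega, hc⟩
        have hd : s.drop (tmp + 1) = s[tmp + 1] :: s.drop (tmp + 2) :=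
          List.drop_eq_getElem_cons hlt
        have hne : s[tmp + 1] ≠ 'w' := by
          intro hc; apply h2; rw [List.getElem?_eq_getElem hlt, hc]
        rw [hd, leadW]
        simp [hne]
      · have hnil : s.drop (tmp + 1) = [] := by
          rw [List.drop_eq_nil_iff]; omega
        rw [hnil]
        simp [leadW]

theorem loopA_eq_loopT (s : List Char) (fuel i : Nat) (hf : s.length - i < fuel)
    (hi : i ≤ s.length) : loopA s fuel i = loopT (s.drop i) := by
  induction fuel generalizing i with
    | zero => omega
    | succ n ih =>
      by_cases h4 : i + 4 ≤ s.length
      · have hilt : i < s.length := by omega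
        rw [loopA, if_pos h4]
        by_cases hw : s[i]? = some 'w'
        · rw [if_pos hw]
          simp only []
          have hgw : s[i] = 'w' := by
            rw [List.getElem?_eq_getElem hilt] at hw; simpa using hw
          have hdc : s.drop i = s[i] :: s.drop (i + 1) := List.drop_eq_getElem_cons hilt
          have hcount : (wolfRun s s.length i 1).1 = leadW (s.drop i) := by
            rw [wolfRun_spec s s.length i 1 (by omega), hdc, hgw, leadW]
            simp; omega
          set c := (wolfRun s s.length i 1).1 with hc
          have hc1 : 1 ≤ c := wolfRun_count_ge s s.length i 1
          have hhead : (s.drop i).head? = some 'w' := by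
            rw [hdc, hgw]; rfl
          have h4' : 4 ≤ (s.drop i).length := by
            simp only [List.length_drop]; omega
          by_cases htake : (s.drop i).take (c * 4) =
              List.replicate c 'w' ++ List.replicate c 'o' ++
              List.replicate c 'l' ++ List.replicate c 'f'
          · rw [if_pos htake]
            have hblk : (s.drop i).take (c * 4) = blockL c := by
              rw [htake]; simp [blockL]
            have hlen : c * 4 ≤ s.length - i := by
              have := congrArg List.length hblk
              simp [blockL_length] at this
              omega
            rw [ih (i + c * 4) (by omega) (by omega)]
            have hstep : loopT (s.drop i) = loopT ((s.drop i).drop (c * 4)) := by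
              conv_lhs => rw [loopT]
              rw [if_pos h4', dif_pos hhead, ← hcount, if_pos hblk]
            rw [hstep, List.drop_drop]
          · rw [if_neg htake]
            have hblk : ¬ (s.drop i).take (c * 4) = blockL c := by
              intro hcon; apply htake; rw [hcon]; simp [blockL]
            have hstep : loopT (s.drop i) = 0 := by
              conv_lhs => rw [loopT]
              rw [if_pos h4', dif_pos hhead, ← hcount, if_neg hblk]
            rw [hstep]
        · rw [if_neg hw]
          have hhead : ¬ (s.drop i).head? = some 'w' := by
            rw [List.head?_drop]; exact hw
          have hstep : loopT (s.drop i) = 0 := by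
            conv_lhs => rw [loopT]
            rw [if_pos (by simp only [List.length_drop]; omega), dif_neg hhead]
          rw [hstep]
      · rw [loopA, if_neg h4]
        have h4' : ¬ 4 ≤ (s.drop i).length := by
          simp only [List.length_drop]; omega
        have hstep : loopT (s.drop i) = if s.drop i = [] then 1 else 0 := by
          conv_lhs => rw [loopT]
          rw [if_neg h4']
        rw [hstep]
        by_cases hie : i = s.length
        · rw [if_pos hie, if_pos (by rw [List.drop_eq_nil_iff]; omega)]
        · rw [if_neg hie, if_neg (by simp only [List.drop_eq_nil_iff]; omega)]

theorem loopT_mem (t : List Char) : loopT t = 0 ∨ loopT t = 1 := by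
  fun_induction loopT t <;> first | assumption | (left; rfl) | (right; rfl)

theorem leadW_w_replicate (c : Nat) (r : List Char) :
    leadW (List.replicate c 'w' ++ r) = c + leadW r := by
  induction c with
  | zero => simp
  | succ c ih => rw [List.replicate_succ, List.cons_append, leadW]; simp [ih]; omega

theorem leadW_replicate_ne (c : Nat) (x : Char) (hx : x ≠ 'w') (r : List Char) :
    leadW (List.replicate c x ++ r) = if c = 0 then leadW r else 0 := by
  cases c with
  | zero => simp
  | succ c => rw [List.replicate_succ, List.cons_append, leadW]; simp [hx]

theorem head?_replicate_append {α : Type} (k : Nat) (x : α) (r : List α) (hk : 1 ≤ k) :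
    (List.replicate k x ++ r).head? = some x := by
  cases k with
  | zero => omega
  | succ k => rw [List.replicate_succ, List.cons_append]; rfl

theorem blockL_head (c : Nat) (hc : 1 ≤ c) (t : List Char) :
    (blockL c ++ t).head? = some 'w' := by
  rw [blockL]
  simp only [List.append_assoc]
  exact head?_replicate_append c 'w' _ hc

theorem leadW_blockL (c : Nat) (hc : 1 ≤ c) (t : List Char) :
    leadW (blockL c ++ t) = c := by
  rw [blockL]
  simp only [List.append_assoc]
  rw [leadW_w_replicate, leadW_replicate_ne c 'o' (by decide), if_neg (by omega)]
  omega

theorem loopT_of_W {t : List Char} (h : W t) : loopT t = 1 := by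
  induction h with
  | nil => rw [loopT]; norm_num
  | block c t hc ht ih =>
    have hlen : (blockL c ++ t).length = c * 4 + t.length := by
      simp [blockL_length]
    have htake : (blockL c ++ t).take (c * 4) = blockL c := by
      rw [← blockL_length c, List.take_left]
    have hdrop : (blockL c ++ t).drop (c * 4) = t := by
      rw [← blockL_length c, List.drop_left]
    rw [loopT, if_pos (show 4 ≤ (blockL c ++ t).length by rw [hlen]; omega),
      dif_pos (blockL_head c hc t), leadW_blockL c hc t, if_pos htake, hdrop]
    exact ih

theorem W_of_loopT : ∀ {t : List Char}, loopT t = 1 → W t := by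
  intro t
  fun_induction loopT t with
  | case1 t h4 hw htake ih =>
    intro h
    have hW := ih h
    have hsplit := List.take_append_drop (leadW t * 4) t
    rw [htake] at hsplit
    rw [← hsplit]
    exact W.block (leadW t) _ (leadW_pos hw) hW
  | case2 t h4 hw htake => intro h; exact absurd h (by norm_num)
  | case3 t h4 hw => intro h; exact absurd h (by norm_num)
  | case4 _ => intro _; exact W.nil
  | case5 t h4 he => intro h; exact absurd h (by norm_num)

theorem checkBlocks_mem (rs : List (Char × Int)) : checkBlocks rs = 0 ∨ checkBlocks rs = 1 := by
  fun_induction checkBlocks rs <;> first | assumption | (left; rfl) | (right; rfl)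

theorem checkBlocks_mod (rs : List (Char × Int)) : rs.length % 4 ≠ 0 → checkBlocks rs = 0 := by
  fun_induction checkBlocks rs
  all_goals intro h
  all_goals first
    | rfl
    | (rename_i ih; apply ih; simp only [List.length_cons] at h; omega)
    | (simp at h)

theorem rleR_pos (t : List Char) : ∀ p ∈ rleR t, 1 ≤ p.2 := by
  induction t with
  | nil => simp [rleR]
  | cons a t ih =>
    rw [rleR]
    rcases hr : rleR t with _ | ⟨⟨d, m⟩, rest⟩
    · simp [rleRcons]
    · have hm : 1 ≤ m := by
        have := ih (d, m) (by rw [hr]; exact List.mem_cons_self)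
        simpa using this
      rw [rleRcons]
      by_cases had : a = d
      · rw [if_pos had]
        intro p hp
        rcases List.mem_cons.mp hp with h1 | h2
        · subst h1; simp; omega
        · exact ih p (by rw [hr]; exact List.mem_cons_of_mem _ h2)
      · rw [if_neg had]
        intro p hp
        rcases List.mem_cons.mp hp with h1 | h2
        · subst h1; simp
        · exact ih p (by rw [hr]; exact h2)

theorem isChain_tail {α : Type} {r : α → α → Prop} {a : α} {l : List α}
    (h : List.IsChain r (a :: l)) : List.IsChain r l := by
  cases h with
  | singleton _ => exact .nil
  | cons_cons _ h2 => exact h2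

theorem rleR_chain (t : List Char) :
    List.IsChain (fun p q : Char × Int => p.1 ≠ q.1) (rleR t) := by
  induction t with
  | nil => exact .nil
  | cons a t ih =>
    rw [rleR]
    rcases hr : rleR t with _ | ⟨⟨d, m⟩, rest⟩
    · exact .singleton _
    · rw [hr] at ih
      rw [rleRcons]
      by_cases had : a = d
      · rw [if_pos had]
        cases rest with
        | nil => exact .singleton _
        | cons q rest' =>
          rw [List.isChain_cons_cons] at ih ⊢
          exact ⟨ih.1, ih.2⟩
      · rw [if_neg had]
        rw [List.isChain_cons_cons]
        exact ⟨had, ih⟩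

theorem expand_rleR (t : List Char) : expand (rleR t) = t := by
  induction t with
  | nil => simp [rleR, expand]
  | cons a t ih =>
    rw [rleR]
    rcases hr : rleR t with _ | ⟨⟨d, m⟩, rest⟩
    · have ht : t = [] := by rw [hr] at ih; simpa [expand] using ih.symm
      subst ht
      simp [rleRcons, expand]
    · have hm : 1 ≤ m := by
        have := rleR_pos t (d, m) (by rw [hr]; exact List.mem_cons_self)
        simpa using this
      rw [hr] at ih
      rw [rleRcons]
      by_cases had : a = d
      · subst had
        rw [if_pos rfl]
        rw [expand] at ih ⊢
        simp only [List.flatMap_cons] at ih ⊢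
        have hmn : (m + 1).toNat = m.toNat + 1 := by omega
        rw [hmn, List.replicate_succ, List.cons_append, ih]
      · rw [if_neg had]
        rw [expand] at ih ⊢
        simp only [List.flatMap_cons] at ih ⊢
        simp [ih]

theorem rleR_replicate_append (k : Nat) (x : Char) (r : List Char)
    (hk : 1 ≤ k) (hr : r.head? ≠ some x) :
    rleR (List.replicate k x ++ r) = (x, (k : Int)) :: rleR r := by
  induction k with
  | zero => omega
  | succ k ih =>
    by_cases hk0 : k = 0
    · subst hk0
      simp only [List.replicate_succ, List.replicate_zero, List.nil_append, List.cons_append]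
      rw [rleR]
      cases r with
      | nil => simp [rleR, rleRcons]
      | cons b r' =>
        obtain ⟨n, rest, hbr⟩ := rleR_head b r'
        have hxb : ¬ x = b := by
          intro hc; apply hr; rw [hc]; rfl
        rw [hbr, rleRcons, if_neg hxb]
        norm_num
    · have ihh := ih (by omega)
      rw [List.replicate_succ, List.cons_append, rleR, ihh, rleRcons, if_pos rfl]
      have hcast : ((k : Int)) + 1 = ((k + 1 : Nat) : Int) := by push_cast; ring
      rw [hcast]

theorem rleR_expand (rs : List (Char × Int)) (hpos : ∀ p ∈ rs, 1 ≤ p.2)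
    (hch : List.IsChain (fun p q : Char × Int => p.1 ≠ q.1) rs) : rleR (expand rs) = rs := by
  induction rs with
  | nil => simp [expand, rleR]
  | cons p rest ih =>
    obtain ⟨c, n⟩ := p
    have hn : 1 ≤ n := by have := hpos (c, n) List.mem_cons_self; simpa using this
    rw [expand, List.flatMap_cons]
    have hhead : (expand rest).head? ≠ some c := by
      cases rest with
      | nil => simp [expand]
      | cons q rest' =>
        obtain ⟨d, m⟩ := q
        have hm : 1 ≤ m := by
          have := hpos (d, m) (List.mem_cons_of_mem _ List.mem_cons_self)
          simpa using this
        rw [expand, List.flatMap_cons]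
        rw [head?_replicate_append m.toNat d _ (by omega)]
        have hne : c ≠ d := (List.isChain_cons_cons.mp hch).1
        simp
        exact fun hc => hne hc.symm
    show rleR (List.replicate n.toNat c ++ expand rest) = (c, n) :: rest
    rw [rleR_replicate_append n.toNat c _ (by omega) hhead]
    rw [ih (fun p hp => hpos p (List.mem_cons_of_mem _ hp)) (isChain_tail hch)]
    congr 1
    simp
    omega

theorem W_head {t : List Char} (h : W t) : t.head? = none ∨ t.head? = some 'w' := by
  cases h with
  | nil => left; rfl
  | block c t hc ht => right; exact blockL_head c hc t

theorem checkB_of_W {t : List Char} (h : W t) : checkBlocks (rleR t) = 1 := by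
  induction h with
  | nil => rw [rleR, checkBlocks]
  | block c t hc ht ih =>
    have hh := W_head ht
    have r4 : rleR (List.replicate c 'f' ++ t) = ('f', (c : Int)) :: rleR t := by
      apply rleR_replicate_append c 'f' t hc
      rcases hh with h1 | h1 <;> rw [h1] <;> simp
    have r3 : rleR (List.replicate c 'l' ++ (List.replicate c 'f' ++ t)) =
        ('l', (c : Int)) :: ('f', (c : Int)) :: rleR t := by
      rw [rleR_replicate_append c 'l' _ hc
        (by rw [head?_replicate_append c 'f' t hc]; simp), r4]
    have r2 : rleR (List.replicate c 'o' ++ (List.replicate c 'l' ++ (List.replicate c 'f' ++ t))) =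
        ('o', (c : Int)) :: ('l', (c : Int)) :: ('f', (c : Int)) :: rleR t := by
      rw [rleR_replicate_append c 'o' _ hc
        (by rw [head?_replicate_append c 'l' _ hc]; simp), r3]
    have r1 : rleR (blockL c ++ t) =
        ('w', (c : Int)) :: ('o', (c : Int)) :: ('l', (c : Int)) :: ('f', (c : Int)) :: rleR t := by
      rw [blockL]
      simp only [List.append_assoc]
      rw [rleR_replicate_append c 'w' _ hc
        (by rw [head?_replicate_append c 'o' _ hc]; simp), r2]
    rw [r1, checkBlocks, if_pos (by norm_num)]
    exact ih

theorem W_of_checkB : ∀ (n : Nat) (t : List Char), t.length ≤ n →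
    checkBlocks (rleR t) = 1 → W t := by
  intro n
  induction n with
  | zero =>
    intro t hlen _
    have : t = [] := List.eq_nil_of_length_eq_zero (by omega)
    subst this
    exact W.nil
  | succ n ih =>
    intro t hlen h
    rcases hr : rleR t with _ | ⟨⟨c0, n0⟩, _ | ⟨⟨c1, n1⟩, _ | ⟨⟨c2, n2⟩, _ | ⟨⟨c3, n3⟩, rest⟩⟩⟩⟩ <;>
      rw [hr] at h
    · have ht : t = [] := by
        have := expand_rleR t; rw [hr] at this; simpa [expand] using this.symm
      subst ht; exact W.nil
    · simp [checkBlocks] at h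
    · simp [checkBlocks] at h
    · simp [checkBlocks] at h
    · rw [checkBlocks] at h
      split_ifs at h with hc
      · obtain ⟨⟨hw, ho, hl, hf⟩, h01, h12, h23⟩ := hc
        subst hw; subst ho; subst hl; subst hf
        rw [← h01, ← h12] at *
        rw [← h01] at h23
        subst h23
        have hn0 : 1 ≤ n0 := by
          have := rleR_pos t ('w', n0) (by rw [hr]; exact List.mem_cons_self)
          simpa using this
        have hexp := expand_rleR t
        rw [hr] at hexp
        rw [expand] at hexp
        simp only [List.flatMap_cons] at hexp
        have hch := rleR_chain t
        rw [hr] at hch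
        have hchrest : List.IsChain (fun p q : Char × Int => p.1 ≠ q.1) rest :=
          isChain_tail (isChain_tail (isChain_tail (isChain_tail hch)))
        have hposrest : ∀ p ∈ rest, 1 ≤ p.2 := by
          intro p hp
          apply rleR_pos t p
          rw [hr]
          exact List.mem_cons_of_mem _ (List.mem_cons_of_mem _
            (List.mem_cons_of_mem _ (List.mem_cons_of_mem _ hp)))
        have hrle' : rleR (expand rest) = rest := rleR_expand rest hposrest hchrest
        have hblock : t = blockL n0.toNat ++ expand rest := by
          rw [← hexp, blockL, expand]
          simp [List.append_assoc]
        rw [hblock]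
        apply W.block n0.toNat _ (by omega)
        apply ih (expand rest) _ (by rw [hrle']; exact h)
        have hlent := congrArg List.length hblock
        rw [List.length_append, blockL_length] at hlent
        omega
      · exact absurd h (by norm_num)

theorem W_counts {t : List Char} (h : W t) :
    t.count 'w' = t.count 'o' ∧ t.count 'o' = t.count 'l' ∧ t.count 'l' = t.count 'f' := by
  induction h with
  | nil => simp
  | block c t hc ht ih =>
    simp [blockL, List.count_append, List.count_replicate]
    omega

theorem freqFold_spec (s : List Char) (f : Nat × Nat × Nat × Nat) :
    s.foldl freqStep f =
      (f.1 + s.count 'w', f.2.1 + s.count 'o', f.2.2.1 + s.count 'l', f.2.2.2 + s.count 'f') := by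
  induction s generalizing f with
  | nil => simp
  | cons a s ih =>
    rw [List.foldl_cons, ih]
    rw [freqStep]
    by_cases hw : a = 'w'
    · subst hw; simp; omega
    · by_cases ho : a = 'o'
      · subst ho; simp; omega
      · by_cases hl : a = 'l'
        · subst hl; simp; omega
        · by_cases hf : a = 'f'
          · subst hf; simp; omega
          · simp [hw, ho, hl, hf]

theorem loopT_eq_checkB (t : List Char) : loopT t = checkBlocks (rleR t) := by
  rcases loopT_mem t with h0 | h1
  · rcases checkBlocks_mem (rleR t) with c0 | c1
    · rw [h0, c0]
    · have := loopT_of_W (W_of_checkB t.length t le_rfl c1)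
      rw [this] at h0; exact absurd h0 (by norm_num)
  · rw [h1, checkB_of_W (W_of_loopT h1)]

theorem solution_hA (string : String) : solution string = loopT string.toList := by
  rw [solution]
  simp only [freqFold_spec]
  split_ifs with hg
  · rcases loopT_mem string.toList with h | h
    · rw [h]
    · exfalso
      have hc := W_counts (W_of_loopT h)
      simp only [Nat.zero_add] at hg
      exact hg.1 (by rw [hc.1])
  · rw [loopA_eq_loopT string.toList (string.toList.length + 1) 0 (by omega) (Nat.zero_le _),
      List.drop_zero]

theorem solution_halt (string : String) :
    solution_alt string = checkBlocks (rleR string.toList) := by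
  rw [solution_alt]
  simp only [rleR_eq_foldl]
  split_ifs with hm
  · exact (checkBlocks_mod _ hm).symm
  · rfl

-- ===== VERDICT (by name: the statement is the Claim_ definition above) =====
theorem solution_spec : Claim_equal_solution := by
  intro string _
  unfold Spec_solution
  rw [solution_hA, solution_halt, loopT_eq_checkB]
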